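-- pv_equiv track=rewrite | github.com/MariamMchedlishvili/GOA-homeworks1 | Level 023/homework/main.py | find_longest_shortest
-- ===== SOURCE A (Python) =====
-- def find_longest_shortest(strings):
--     shortest = strings[0]
--     longest = strings[0]
--
--     for string in strings:
--         if len(string) < len(shortest):
--             shortest = string
--         if len(string) > len(longest):
--             longest = string
--
--     return longest, shortest
-- ===== SOURCE B (Python) =====
-- def find_longest_shortest(strings):
--     first_by_len = {}
--     for s in strings:
--         first_by_len.setdefault(len(s), s)
--     return first_by_len[max(first_by_len)], first_by_len[min(first_by_len)]
-- ===== Notes on version B (the rewrite author's own statement) =====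
-- stated objective: alternative
-- what changed: Instead of tracking running shortest/longest strings, B builds a dict mapping each length to the first string of that length (setdefault) and then takes max/min over the integer keys to look up the answers.
import Mathlib
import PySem

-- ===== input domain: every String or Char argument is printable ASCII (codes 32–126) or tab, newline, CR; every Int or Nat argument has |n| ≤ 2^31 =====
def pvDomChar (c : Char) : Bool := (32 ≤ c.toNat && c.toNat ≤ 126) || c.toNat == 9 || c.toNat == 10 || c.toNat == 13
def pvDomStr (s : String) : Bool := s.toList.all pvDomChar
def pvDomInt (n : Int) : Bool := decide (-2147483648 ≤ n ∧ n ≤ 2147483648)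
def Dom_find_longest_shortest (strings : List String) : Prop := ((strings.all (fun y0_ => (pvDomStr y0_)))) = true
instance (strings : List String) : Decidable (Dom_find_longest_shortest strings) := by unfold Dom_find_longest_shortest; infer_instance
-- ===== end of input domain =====

-- B groups strings by length into a dict of first occurrences, then takes max/min over the integer keys; same result, different structure, not faster.


-- ===== PORT A =====
def find_longest_shortest (strings : List String) : String × String :=
  match strings with
  | [] => ("", "")  -- strings[0] raises IndexError in Python; excluded by Pre_
  | s0 :: _ =>
    let p := strings.foldl (fun (p : String × String) string =>
      let shortest := if PySem.Str.len string < PySem.Str.len p.1 then string else p.1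
      let longest := if PySem.Str.len string > PySem.Str.len p.2 then string else p.2
      (shortest, longest)) (s0, s0)
    (p.2, p.1)

-- ===== PORT B =====
def find_longest_shortest_alt (strings : List String) : String × String :=
  let d := strings.foldl (fun (d : PySem.Dict Int String) s =>
    d.setdefault (PySem.Str.len s) s) (PySem.Dict.mk [])
  match PySem.List.max? (PySem.Dict.keys d) (fun k => k),
        PySem.List.min? (PySem.Dict.keys d) (fun k => k) with
  | some kmax, some kmin =>
    -- Python's d[k]: both keys provably belong to the dict, so get? is some; "" is unreachable
    (((d.get? kmax).getD ""), ((d.get? kmin).getD ""))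
  | _, _ => ("", "")  -- empty dict: max(first_by_len) raises ValueError in Python; excluded by Pre_

-- ===== PRECONDITION & SPEC =====
-- Pre_ excludes only the empty list, on which A raises IndexError (and B raises ValueError).
def Pre_find_longest_shortest (strings : List String) : Prop := strings ≠ []
instance (strings : List String) : Decidable (Pre_find_longest_shortest strings) := by unfold Pre_find_longest_shortest; infer_instance
def pvWitness_find_longest_shortest : List String := ["ab", "c", "def"]

def Spec_find_longest_shortest (strings : List String) (out : String × String) : Prop := out = find_longest_shortest_alt strings
instance (strings : List String) (out : String × String) : Decidable (Spec_find_longest_shortest strings out) := by unfold Spec_find_longest_shortest; infer_instance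

-- ===== CLAIM (what is proved, stated in full; the proofs are below) =====
def Claim_equal_find_longest_shortest : Prop := ∀ (strings : List String), Dom_find_longest_shortest strings → Pre_find_longest_shortest strings → Spec_find_longest_shortest strings (find_longest_shortest strings)

-- ===== LEMMAS AND PROOFS =====

-- A's pair fold splits into two independent running-extremum folds.
lemma pair_fold (rest : List String) (sh lo : String) :
    rest.foldl (fun (p : String × String) string =>
      (if PySem.Str.len string < PySem.Str.len p.1 then string else p.1,
       if PySem.Str.len string > PySem.Str.len p.2 then string else p.2)) (sh, lo)
    = (rest.foldl (fun m x => if PySem.Str.len x < PySem.Str.len m then x else m) sh,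
       rest.foldl (fun m x => if PySem.Str.len x > PySem.Str.len m then x else m) lo) := by
  induction rest generalizing sh lo with
  | nil => rfl
  | cons x t ih => simp only [List.foldl]; rw [ih]

-- The running max-by-length fold: its result is length-maximal and is the FIRST element of its length.
lemma run_max (l : List String) (m : String) :
    (∀ x ∈ m :: l, PySem.Str.len x ≤ PySem.Str.len (l.foldl (fun m x => if PySem.Str.len x > PySem.Str.len m then x else m) m)) ∧
    (m :: l).find? (fun x => PySem.Str.len x == PySem.Str.len (l.foldl (fun m x => if PySem.Str.len x > PySem.Str.len m then x else m) m)) = some (l.foldl (fun m x => if PySem.Str.len x > PySem.Str.len m then x else m) m) := by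
  induction l generalizing m with
  | nil => simp
  | cons x t ih =>
    simp only [List.foldl]
    by_cases h : PySem.Str.len x > PySem.Str.len m
    · simp only [if_pos h]
      obtain ⟨ihle, ihf⟩ := ih x
      have hmr : PySem.Str.len m < PySem.Str.len (t.foldl (fun m x => if PySem.Str.len x > PySem.Str.len m then x else m) x) :=
        lt_of_lt_of_le h (ihle x (List.mem_cons_self))
      constructor
      · intro y hy
        rcases List.mem_cons.mp hy with rfl | hy
        · exact le_of_lt hmr
        · exact ihle y hy
      · rw [List.find?_cons_of_neg (by simp only [beq_iff_eq]; exact ne_of_lt hmr), ihf]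
    · simp only [if_neg h]
      obtain ⟨ihle, ihf⟩ := ih m
      have hle : ∀ y ∈ m :: x :: t, PySem.Str.len y ≤ PySem.Str.len (t.foldl (fun m x => if PySem.Str.len x > PySem.Str.len m then x else m) m) := by
        intro y hy
        rcases List.mem_cons.mp hy with rfl | hy
        · exact ihle y List.mem_cons_self
        · rcases List.mem_cons.mp hy with rfl | hy
          · exact le_trans (le_of_not_gt h) (ihle m List.mem_cons_self)
          · exact ihle y (List.mem_cons_of_mem _ hy)
      refine ⟨hle, ?_⟩
      by_cases hm : PySem.Str.len m = PySem.Str.len (t.foldl (fun m x => if PySem.Str.len x > PySem.Str.len m then x else m) m)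
      · have : (m :: t).find? (fun x => PySem.Str.len x == PySem.Str.len (t.foldl (fun m x => if PySem.Str.len x > PySem.Str.len m then x else m) m)) = some m := by
          rw [List.find?_cons_of_pos (by simp only [beq_iff_eq]; exact hm)]
        rw [this] at ihf
        rw [List.find?_cons_of_pos (by simp only [beq_iff_eq]; exact hm)]
        exact ihf
      · have hx : PySem.Str.len x ≠ PySem.Str.len (t.foldl (fun m x => if PySem.Str.len x > PySem.Str.len m then x else m) m) := by
          have h1 : PySem.Str.len x ≤ PySem.Str.len m := le_of_not_gt h
          have h2 : PySem.Str.len m ≤ _ := ihle m List.mem_cons_self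
          omega
        rw [List.find?_cons_of_neg (by simp only [beq_iff_eq]; exact hm),
            List.find?_cons_of_neg (by simp only [beq_iff_eq]; exact hx)]
        rw [List.find?_cons_of_neg (by simp only [beq_iff_eq]; exact hm)] at ihf
        exact ihf

-- Mirror lemma for the running min-by-length fold.
lemma run_min (l : List String) (m : String) :
    (∀ x ∈ m :: l, PySem.Str.len (l.foldl (fun m x => if PySem.Str.len x < PySem.Str.len m then x else m) m) ≤ PySem.Str.len x) ∧
    (m :: l).find? (fun x => PySem.Str.len x == PySem.Str.len (l.foldl (fun m x => if PySem.Str.len x < PySem.Str.len m then x else m) m)) = some (l.foldl (fun m x => if PySem.Str.len x < PySem.Str.len m then x else m) m) := by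
  induction l generalizing m with
  | nil => simp
  | cons x t ih =>
    simp only [List.foldl]
    by_cases h : PySem.Str.len x < PySem.Str.len m
    · simp only [if_pos h]
      obtain ⟨ihle, ihf⟩ := ih x
      have hmr : PySem.Str.len (t.foldl (fun m x => if PySem.Str.len x < PySem.Str.len m then x else m) x) < PySem.Str.len m :=
        lt_of_le_of_lt (ihle x List.mem_cons_self) h
      constructor
      · intro y hy
        rcases List.mem_cons.mp hy with rfl | hy
        · exact le_of_lt hmr
        · exact ihle y hy
      · rw [List.find?_cons_of_neg (by simp only [beq_iff_eq]; exact ne_of_gt hmr), ihf]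
    · simp only [if_neg h]
      obtain ⟨ihle, ihf⟩ := ih m
      have hle : ∀ y ∈ m :: x :: t, PySem.Str.len (t.foldl (fun m x => if PySem.Str.len x < PySem.Str.len m then x else m) m) ≤ PySem.Str.len y := by
        intro y hy
        rcases List.mem_cons.mp hy with rfl | hy
        · exact ihle y List.mem_cons_self
        · rcases List.mem_cons.mp hy with rfl | hy
          · exact le_trans (ihle m List.mem_cons_self) (le_of_not_gt h)
          · exact ihle y (List.mem_cons_of_mem _ hy)
      refine ⟨hle, ?_⟩
      by_cases hm : PySem.Str.len m = PySem.Str.len (t.foldl (fun m x => if PySem.Str.len x < PySem.Str.len m then x else m) m)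
      · have : (m :: t).find? (fun x => PySem.Str.len x == PySem.Str.len (t.foldl (fun m x => if PySem.Str.len x < PySem.Str.len m then x else m) m)) = some m := by
          rw [List.find?_cons_of_pos (by simp only [beq_iff_eq]; exact hm)]
        rw [this] at ihf
        rw [List.find?_cons_of_pos (by simp only [beq_iff_eq]; exact hm)]
        exact ihf
      · have hx : PySem.Str.len x ≠ PySem.Str.len (t.foldl (fun m x => if PySem.Str.len x < PySem.Str.len m then x else m) m) := by
          have h1 : PySem.Str.len m ≤ PySem.Str.len x := le_of_not_gt h
          have h2 : _ ≤ PySem.Str.len m := ihle m List.mem_cons_self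
          omega
        rw [List.find?_cons_of_neg (by simp only [beq_iff_eq]; exact hm),
            List.find?_cons_of_neg (by simp only [beq_iff_eq]; exact hx)]
        rw [List.find?_cons_of_neg (by simp only [beq_iff_eq]; exact hm)] at ihf
        exact ihf

-- B's dict fold: lookup in the built dict is first-match-by-length over the list.
lemma dict_get (l : List String) (d0 : PySem.Dict Int String) (k : Int) :
    (l.foldl (fun (d : PySem.Dict Int String) s => d.setdefault (PySem.Str.len s) s) d0).get? k
    = (d0.get? k).or (l.find? (fun s => PySem.Str.len s == k)) := by
  induction l generalizing d0 with
  | nil => simp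
  | cons s t ih =>
    simp only [List.foldl]
    rw [ih]
    by_cases hk : k = PySem.Str.len s
    · subst hk
      rw [PySem.Dict.get?_setdefault_self, List.find?_cons_of_pos (by simp)]
      cases h0 : d0.get? (PySem.Str.len s) <;> simp [Option.or]
    · rw [PySem.Dict.get?_setdefault_of_ne _ _ hk,
          List.find?_cons_of_neg (by simp only [beq_iff_eq]; exact fun he => hk he.symm)]

-- B's dict fold: its keys are exactly the lengths occurring in the list.
lemma dict_keys_mem (l : List String) (d0 : PySem.Dict Int String) (k : Int) :
    k ∈ (l.foldl (fun (d : PySem.Dict Int String) s => d.setdefault (PySem.Str.len s) s) d0).keys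
    ↔ k ∈ d0.keys ∨ k ∈ l.map PySem.Str.len := by
  induction l generalizing d0 with
  | nil => simp
  | cons s t ih =>
    simp only [List.foldl, List.map, List.mem_cons]
    rw [ih]
    have : k ∈ (d0.setdefault (PySem.Str.len s) s).keys ↔ k ∈ d0.keys ∨ k = PySem.Str.len s := by
      rw [← PySem.Dict.contains_iff_mem_keys, PySem.Dict.contains_setdefault,
          ← PySem.Dict.contains_iff_mem_keys]
      simp [or_comm]
    rw [this]; tauto
  
-- ===== VERDICT (by name: the statement is the Claim_ definition above) =====
theorem find_longest_shortest_spec : Claim_equal_find_longest_shortest := by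
  intro strings _ hpre
  match strings with
  | [] => exact absurd rfl hpre
  | s0 :: rest =>
    show find_longest_shortest (s0 :: rest) = find_longest_shortest_alt (s0 :: rest)
    -- A's side: reduce to the two running folds over rest starting at s0
    have hA : find_longest_shortest (s0 :: rest)
        = (rest.foldl (fun m x => if PySem.Str.len x > PySem.Str.len m then x else m) s0,
           rest.foldl (fun m x => if PySem.Str.len x < PySem.Str.len m then x else m) s0) := by
      simp only [find_longest_shortest, List.foldl, lt_self_iff_false, gt_iff_lt, ite_self]
      rw [pair_fold]
    set Rmax := rest.foldl (fun m x => if PySem.Str.len x > PySem.Str.len m then x else m) s0 with hRmax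
    set Rmin := rest.foldl (fun m x => if PySem.Str.len x < PySem.Str.len m then x else m) s0 with hRmin
    obtain ⟨hmaxle, hmaxf⟩ := run_max rest s0
    obtain ⟨hminle, hminf⟩ := run_min rest s0
    -- B's side
    set d := (s0 :: rest).foldl (fun (d : PySem.Dict Int String) s => d.setdefault (PySem.Str.len s) s) (PySem.Dict.mk []) with hd
    have hkeys : ∀ k, k ∈ d.keys ↔ k ∈ (s0 :: rest).map PySem.Str.len := by
      intro k; rw [hd, dict_keys_mem]; simp
    have hkne : d.keys ≠ [] := by
      intro hnil
      have := (hkeys (PySem.Str.len s0)).mpr (by simp)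
      rw [hnil] at this; exact absurd this (List.not_mem_nil)
    obtain ⟨kmax, hkmax⟩ := Option.ne_none_iff_exists'.mp
      (fun h => hkne ((PySem.List.max?_eq_none_iff d.keys (fun k => k)).mp h))
    obtain ⟨kmin, hkmin⟩ := Option.ne_none_iff_exists'.mp
      (fun h => hkne ((PySem.List.min?_eq_none_iff d.keys (fun k => k)).mp h))
    -- kmax = len Rmax
    have hkmaxmem : kmax ∈ (s0 :: rest).map PySem.Str.len :=
      (hkeys kmax).mp (PySem.List.max?_mem hkmax)
    have hRmaxmem : Rmax ∈ s0 :: rest := List.mem_of_find?_eq_some hmaxf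
    have hkmaxval : kmax = PySem.Str.len Rmax := by
      obtain ⟨x, hx, hxk⟩ := List.mem_map.mp hkmaxmem
      have h1 : kmax ≤ PySem.Str.len Rmax := hxk ▸ hmaxle x hx
      have h2 : PySem.Str.len Rmax ≤ kmax :=
        PySem.List.max?_isMax hkmax _ ((hkeys _).mpr (List.mem_map_of_mem hRmaxmem))
      omega
    have hkminmem : kmin ∈ (s0 :: rest).map PySem.Str.len :=
      (hkeys kmin).mp (PySem.List.min?_mem hkmin)
    have hRminmem : Rmin ∈ s0 :: rest := List.mem_of_find?_eq_some hminf
    have hkminval : kmin = PySem.Str.len Rmin := by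
      obtain ⟨x, hx, hxk⟩ := List.mem_map.mp hkminmem
      have h1 : PySem.Str.len Rmin ≤ kmin := hxk ▸ hminle x hx
      have h2 : kmin ≤ PySem.Str.len Rmin :=
        PySem.List.min?_isMin hkmin _ ((hkeys _).mpr (List.mem_map_of_mem hRminmem))
      omega
    have hgmax : d.get? kmax = some Rmax := by
      rw [hd, dict_get, hkmaxval]; exact hmaxf
    have hgmin : d.get? kmin = some Rmin := by
      rw [hd, dict_get, hkminval]; exact hminf
    rw [hA]
    show _ = find_longest_shortest_alt (s0 :: rest)
    simp only [find_longest_shortest_alt]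
    rw [← hd, hkmax, hkmin]
    show (Rmax, Rmin) = ((d.get? kmax).getD "", (d.get? kmin).getD "")
    rw [hgmax, hgmin]
    rfl
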